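-- pv_equiv track=rewrite | github.com/tunanet/github-trending-mcp | src/github_trending_mcp/http_server.py | _split_languages
-- ===== SOURCE A (Python) =====
-- from typing import AsyncIterator, Callable, List, Optional
--
-- def _split_languages(raw_languages: Optional[List[str]]) -> Optional[List[str]]:
--     """支持 `?languages=python&languages=go` 或 `?languages=python,go` 形式。"""
--
--     if not raw_languages:
--         return None
--     normalized: List[str] = []
--     for entry in raw_languages:
--         if not entry:
--             continue
--         parts = [segment.strip() for segment in entry.split(",") if segment.strip()]
--         normalized.extend(parts)
--     return normalized or None
-- ===== SOURCE B (Python) =====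
-- from typing import List, Optional
--
-- def _split_languages(raw_languages: Optional[List[str]]) -> Optional[List[str]]:
--     """Single-pass character-level tokenizer: scan each entry once, cutting tokens
--     at commas; leading whitespace never enters the buffer and trailing whitespace
--     is held in a pending buffer that is committed only when another token
--     character follows, so tokens come out already stripped."""
--     if not raw_languages:
--         return None
--     tokens: List[str] = []
--     for entry in raw_languages:
--         buf: List[str] = []    # current token so far (no leading/trailing ws)
--         pend: List[str] = []   # whitespace run seen after buf, not yet committed
--         for ch in entry:
--             if ch == ',':
--                 if buf:
--                     tokens.append(''.join(buf))
--                     buf = []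
--                 pend = []
--             elif ch.isspace():
--                 if buf:
--                     pend.append(ch)
--             else:
--                 buf += pend
--                 pend = []
--                 buf.append(ch)
--         if buf:
--             tokens.append(''.join(buf))
--     return tokens or None
-- ===== Notes on version B (the rewrite author's own statement) =====
-- stated objective: alternative
-- what changed: A tokenizes by calling split(',') per entry, stripping each segment and filtering; B replaces split/strip entirely with a single-pass character-level state machine that cuts tokens at commas and keeps trailing whitespace in a pending buffer so tokens come out already stripped.
import Mathlib
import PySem

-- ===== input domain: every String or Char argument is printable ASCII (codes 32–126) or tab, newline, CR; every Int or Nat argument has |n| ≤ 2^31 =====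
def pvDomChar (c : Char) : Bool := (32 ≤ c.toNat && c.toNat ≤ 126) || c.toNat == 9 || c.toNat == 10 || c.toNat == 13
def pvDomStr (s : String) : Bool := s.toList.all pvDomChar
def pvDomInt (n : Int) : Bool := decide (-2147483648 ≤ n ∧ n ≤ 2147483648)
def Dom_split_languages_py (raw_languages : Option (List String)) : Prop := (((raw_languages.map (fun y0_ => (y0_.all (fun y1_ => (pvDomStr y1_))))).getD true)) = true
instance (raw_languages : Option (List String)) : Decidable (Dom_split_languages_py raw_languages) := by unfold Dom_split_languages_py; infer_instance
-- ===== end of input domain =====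

-- B replaces A's split(',')-per-entry / strip / filter pipeline by a single-pass character-level
-- tokenizer with a pending-whitespace buffer (alternative algorithm, same exact result).

-- ===== PORT A =====
-- literal port of _split_languages: skip falsy entries, split each on ",", strip, drop empties, extend
def split_languages_py (raw_languages : Option (List String)) : Option (List String) :=
  match raw_languages with
  | none => none
  | some entries =>
    if entries.isEmpty then none   -- `if not raw_languages` (empty list is falsy)
    else
      let normalized := entries.foldl (fun acc entry =>
        if entry == "" then acc    -- `if not entry: continue`
        else
          -- sep "," is a nonempty literal, so entry.split(",") never raises: getD [] is unreachable
          let parts := (((PySem.Str.split? entry ",").getD []).filter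
              (fun seg => !(PySem.Str.strip seg == ""))).map PySem.Str.strip
          acc ++ parts) ([] : List String)
      if normalized.isEmpty then none else some normalized   -- `return normalized or None`

-- ===== PORT B =====
-- the inner character loop of Source B: state = (tokens so far, current buffer, pending whitespace)
def pvScanGo : List Char → List String → List Char → List Char → List String
  | [], toks, buf, _ =>
    if buf.isEmpty then toks else toks ++ [String.ofList buf]   -- end of entry: flush buf
  | c :: cs, toks, buf, pend =>
    if c == ',' then
      pvScanGo cs (if buf.isEmpty then toks else toks ++ [String.ofList buf]) [] []
    else if PySem.Chars.isspace c then
      pvScanGo cs toks buf (if buf.isEmpty then [] else pend ++ [c])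
    else
      pvScanGo cs toks (buf ++ pend ++ [c]) []

-- port of Source B: scan every entry once with the tokenizer
def split_languages_py_alt (raw_languages : Option (List String)) : Option (List String) :=
  match raw_languages with
  | none => none
  | some entries =>
    if entries.isEmpty then none
    else
      let tokens := entries.foldl (fun toks e => pvScanGo e.toList toks [] []) ([] : List String)
      if tokens.isEmpty then none else some tokens   -- `return tokens or None`

-- ===== PRECONDITION & SPEC =====
def Spec_split_languages_py (raw_languages : Option (List String)) (out : Option (List String)) : Prop := out = split_languages_py_alt raw_languages
instance (raw_languages : Option (List String)) (out : Option (List String)) : Decidable (Spec_split_languages_py raw_languages out) := by unfold Spec_split_languages_py; infer_instance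

-- ===== CLAIM (what is proved, stated in full; the proofs are below) =====
def Claim_equal_split_languages_py : Prop := ∀ (raw_languages : Option (List String)), Dom_split_languages_py raw_languages → Spec_split_languages_py raw_languages (split_languages_py raw_languages)

-- ===== LEMMAS AND PROOFS =====

-- the per-piece cleanup: strip every piece, drop the ones that strip to empty
def pvClean (ps : List (List Char)) : List (List Char) :=
  (ps.map PySem.Chars.strip).filter (fun cs => !cs.isEmpty)

-- PySem's fuel-based splitOn on the one-char separator [','] is List.splitOnP (· == ',')
theorem pvGo_eq (fuel : Nat) (l cur : List Char) (acc : List (List Char)) (h : l.length ≤ fuel) :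
    PySem.Chars.splitOn.go [','] fuel l cur acc
      = acc.reverse ++ (l.splitOnP (fun c => c == ',')).modifyHead (cur.reverse ++ ·) := by
  induction fuel generalizing l cur acc with
  | zero =>
    have : l = [] := List.length_eq_zero_iff.mp (Nat.le_zero.mp h)
    subst this
    simp [PySem.Chars.splitOn.go, List.splitOnP_nil]
  | succ f ih =>
    cases l with
    | nil => simp [PySem.Chars.splitOn.go, List.splitOnP_nil]
    | cons c rest =>
      obtain ⟨h0, t0, hsp⟩ := List.exists_cons_of_ne_nil
        (List.splitOnP_ne_nil (fun c => c == ',') rest)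
      by_cases hc : c = ','
      · subst hc
        rw [PySem.Chars.splitOn.go]
        simp only [List.isPrefixOf, BEq.rfl, Bool.true_and, if_true,
          List.length_cons, List.length_nil, Nat.zero_add, List.drop_succ_cons, List.drop_zero]
        rw [ih rest [] (List.reverse cur :: acc) (by simpa using h), List.splitOnP_cons]
        simp [hsp]
      · rw [PySem.Chars.splitOn.go]
        have hpre : [','].isPrefixOf (c :: rest) = false := by
          simp [List.isPrefixOf]; exact fun hh => absurd hh.symm hc
        simp only [hpre, Bool.false_eq_true, if_false]
        rw [ih rest (c :: cur) acc (by simpa using h), List.splitOnP_cons]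
        simp [hsp, hc]

theorem pvSplitOn_comma (cs : List Char) :
    PySem.Chars.splitOn cs [','] = cs.splitOnP (fun c => c == ',') := by
  obtain ⟨h0, t0, hsp⟩ := List.exists_cons_of_ne_nil
    (List.splitOnP_ne_nil (fun c => c == ',') cs)
  rw [PySem.Chars.splitOn, pvGo_eq _ _ _ _ (Nat.le_succ _)]
  simp [hsp]

-- per-entry: A's string-level parts are the cleaned char-level pieces, re-stringed
theorem pvEntry_eq (s : String) :
    (((PySem.Str.split? s ",").getD []).filter
        (fun seg => !(PySem.Str.strip seg == ""))).map PySem.Str.strip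
      = (pvClean (s.toList.splitOnP (fun c => c == ','))).map String.ofList := by
  have hsplit : PySem.Str.split? s ","
      = some ((PySem.Chars.splitOn s.toList [',']).map String.ofList) := by
    simp [PySem.Str.split?, PySem.Chars.split?]
  rw [hsplit, pvSplitOn_comma]
  simp only [Option.getD_some, pvClean, List.filter_map, List.map_map]
  congr 1
  · funext cs
    simp [Function.comp, PySem.Str.strip]
  · congr 1
    funext cs
    simp only [Function.comp, PySem.Str.strip]
    rw [Bool.eq_iff_iff]
    simp [String.ext_iff]

-- A's accumulator loop, closed form
theorem pvA_loop (entries : List String) :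
    entries.foldl (fun acc entry =>
        if entry == "" then acc
        else acc ++ ((((PySem.Str.split? entry ",").getD []).filter
            (fun seg => !(PySem.Str.strip seg == ""))).map PySem.Str.strip)) []
      = (entries.filter (fun e => !(e == ""))).flatMap
          (fun e => (pvClean (e.toList.splitOnP (fun c => c == ','))).map String.ofList) := by
  induction entries using List.reverseRecOn with
  | nil => rfl
  | append_singleton l x ih =>
    rw [List.foldl_append, List.foldl_cons, List.foldl_nil, List.filter_append,
      List.flatMap_append]
    by_cases hx : x = ""
    · subst hx; simpa using ih
    · have : (x == "") = false := by simp [hx]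
      simp only [this, Bool.false_eq_true, if_false, Bool.not_false, List.filter_cons]
      rw [ih, pvEntry_eq]
      simp

-- splitOnP over a prefix free of separators prepends it to the first piece
theorem pvSplitOnP_prefix (a d : List Char) (ha : ∀ c ∈ a, (c == ',') = false) :
    List.splitOnP (fun c => c == ',') (a ++ d)
      = (List.splitOnP (fun c => c == ',') d).modifyHead (a ++ ·) := by
  induction a with
  | nil =>
    obtain ⟨h0, t0, hsp⟩ := List.exists_cons_of_ne_nil
      (List.splitOnP_ne_nil (fun c => c == ',') d)
    simp [hsp]
  | cons x xs ih =>
    have hx : (x == ',') = false := ha x (by simp)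
    rw [List.cons_append, List.splitOnP_cons]
    simp only [hx, Bool.false_eq_true, if_false]
    rw [ih (fun c hc => ha c (by simp [hc]))]
    obtain ⟨h0, t0, hsp⟩ := List.exists_cons_of_ne_nil
      (List.splitOnP_ne_nil (fun c => c == ',') d)
    simp [hsp]

-- stripping ignores one leading whitespace character
theorem pvStrip_cons_ws (c : Char) (x : List Char) (hc : PySem.Chars.isspace c = true) :
    PySem.Chars.strip (c :: x) = PySem.Chars.strip x := by
  simp [PySem.Chars.strip, PySem.Chars.lstrip, hc]

-- a list whose head does not satisfy p is unchanged by dropWhile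
theorem pvDropWhile_eq_self (p : Char → Bool) (l : List Char)
    (h : ∀ x ∈ l.head?, p x = false) : List.dropWhile p l = l := by
  cases l with
  | nil => rfl
  | cons a t =>
    have := h a (by simp)
    simp [this]

-- stripping a buffer with non-space ends padded by trailing whitespace gives the buffer back
theorem pvStrip_pad (buf pend : List Char)
    (hh : ∀ x ∈ buf.head?, PySem.Chars.isspace x = false)
    (hl : ∀ x ∈ buf.getLast?, PySem.Chars.isspace x = false)
    (hp : ∀ c ∈ pend, PySem.Chars.isspace c = true) :
    PySem.Chars.strip (buf ++ pend) = buf := by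
  cases buf with
  | nil =>
    cases pend with
    | nil => rfl
    | cons p ps =>
      have : PySem.Chars.strip (p :: ps) = PySem.Chars.strip ps := pvStrip_cons_ws _ _ (hp p (by simp))
      rw [List.nil_append, this]
      have := pvStrip_pad [] ps (by simp) (by simp) (fun c hc => hp c (by simp [hc]))
      simpa using this
  | cons b bs =>
    have hb : PySem.Chars.isspace b = false := hh b (by simp)
    have hlstrip : PySem.Chars.lstrip ((b :: bs) ++ pend) = (b :: bs) ++ pend := by
      simp [PySem.Chars.lstrip, hb]
    rw [PySem.Chars.strip, hlstrip]
    -- rstrip: reverse, dropWhile, reverse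
    have hrev : ((b :: bs) ++ pend).reverse = pend.reverse ++ (b :: bs).reverse := by
      simp
    have hdp : List.dropWhile PySem.Chars.isspace pend.reverse = [] := by
      rw [List.dropWhile_eq_nil_iff]
      intro c hc
      exact hp c (by simpa using hc)
    have hlast : ∀ x ∈ (b :: bs).reverse.head?, PySem.Chars.isspace x = false := by
      intro x hx
      rw [List.head?_reverse] at hx
      exact hl x hx
    have hdb : List.dropWhile PySem.Chars.isspace (b :: bs).reverse = (b :: bs).reverse :=
      pvDropWhile_eq_self PySem.Chars.isspace _ hlast
    rw [PySem.Chars.rstrip, hrev, List.dropWhile_append, hdp, if_pos List.isEmpty_nil, hdb,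
      List.reverse_reverse]

-- the tokenizer, characterized: scanning cs from state (toks, buf, pend) yields toks followed by
-- the cleaned comma-pieces of buf ++ pend ++ cs
theorem pvScanGo_eq (cs : List Char) (toks : List String) (buf pend : List Char)
    (hbc : ∀ c ∈ buf, (c == ',') = false)
    (hpc : ∀ c ∈ pend, (c == ',') = false)
    (hps : ∀ c ∈ pend, PySem.Chars.isspace c = true)
    (hbp : buf = [] → pend = [])
    (hh : ∀ x ∈ buf.head?, PySem.Chars.isspace x = false)
    (hl : ∀ x ∈ buf.getLast?, PySem.Chars.isspace x = false) :
    pvScanGo cs toks buf pend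
      = toks ++ (pvClean (List.splitOnP (fun c => c == ',') (buf ++ pend ++ cs))).map
          String.ofList := by
  induction cs generalizing toks buf pend with
  | nil =>
    rw [pvScanGo]
    have hsp : List.splitOnP (fun c => c == ',') (buf ++ pend) = [buf ++ pend] := by
      have h := pvSplitOnP_prefix (buf ++ pend) []
        (by intro c hc; rcases List.mem_append.mp hc with h | h; exact hbc c h; exact hpc c h)
      simpa using h
    rw [List.append_nil, hsp]
    have hstrip : PySem.Chars.strip (buf ++ pend) = buf := pvStrip_pad buf pend hh hl hps
    cases buf with
    | nil =>
      have : pend = [] := hbp rfl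
      subst this
      have h0 : PySem.Chars.strip ([] : List Char) = [] := rfl
      simp [pvClean, h0]
    | cons b bs =>
      have hstrip' : PySem.Chars.strip (b :: (bs ++ pend)) = b :: bs := hstrip
      simp [pvClean, hstrip']
  | cons c cs ih =>
    rw [pvScanGo]
    by_cases hc : c = ','
    · subst hc
      simp only [BEq.rfl, if_true]
      rw [ih _ [] [] (by simp) (by simp) (by simp) (fun _ => rfl) (by simp) (by simp)]
      have hsplit : List.splitOnP (fun c => c == ',') (buf ++ pend ++ ',' :: cs)
          = (buf ++ pend) :: List.splitOnP (fun c => c == ',') cs := by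
        rw [List.append_assoc, pvSplitOnP_prefix buf (pend ++ ',' :: cs) hbc,
          pvSplitOnP_prefix pend (',' :: cs) hpc, List.splitOnP_cons]
        simp
      rw [hsplit]
      have hstrip : PySem.Chars.strip (buf ++ pend) = buf := pvStrip_pad buf pend hh hl hps
      cases buf with
      | nil =>
        have : pend = [] := hbp rfl
        subst this
        have h0 : PySem.Chars.strip ([] : List Char) = [] := rfl
        simp [pvClean, h0]
      | cons b bs =>
        simp only [List.isEmpty_cons, Bool.false_eq_true, if_false]
        have hstrip' : PySem.Chars.strip (b :: (bs ++ pend)) = b :: bs := hstrip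
        simp [pvClean, hstrip']
    · have hc' : (c == ',') = false := by simp [hc]
      simp only [hc', Bool.false_eq_true, if_false]
      by_cases hs : PySem.Chars.isspace c = true
      · simp only [hs, if_true]
        cases buf with
        | nil =>
          have : pend = [] := hbp rfl
          subst this
          simp only [List.isEmpty_nil, if_true]
          rw [ih _ [] [] (by simp) (by simp) (by simp) (fun _ => rfl) (by simp) (by simp)]
          -- both sides: the leading whitespace char is erased by strip on the first piece
          congr 1
          rw [List.nil_append, List.nil_append, List.nil_append, List.splitOnP_cons]
          simp only [hc', Bool.false_eq_true, if_false]
          obtain ⟨h0, t0, hsp⟩ := List.exists_cons_of_ne_nil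
            (List.splitOnP_ne_nil (fun c => c == ',') cs)
          rw [hsp]
          simp [pvClean, pvStrip_cons_ws c h0 hs]
        | cons b bs =>
          simp only [List.isEmpty_cons, Bool.false_eq_true, if_false]
          rw [ih _ (b :: bs) (pend ++ [c]) hbc
            (by intro x hx; rcases List.mem_append.mp hx with h | h
                · exact hpc x h
                · simp at h; subst h; exact hc')
            (by intro x hx; rcases List.mem_append.mp hx with h | h
                · exact hps x h
                · simp at h; subst h; exact hs)
            (by intro h; exact absurd h (by simp)) hh hl]
          congr 3
          simp
      · simp only [hs, Bool.false_eq_true, if_false]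
        have hs' : PySem.Chars.isspace c = false := by
          cases hxx : PySem.Chars.isspace c
          · rfl
          · exact absurd hxx hs
        rw [ih _ (buf ++ pend ++ [c]) []
          (by intro x hx
              rcases List.mem_append.mp hx with h | h
              · rcases List.mem_append.mp h with h' | h'
                · exact hbc x h'
                · exact hpc x h'
              · simp at h; subst h; exact hc')
          (by simp) (by simp) (by intro h; simp at h) 
          (by intro x hx
              cases buf with
              | nil =>
                have : pend = [] := hbp rfl
                subst this
                simp at hx
                subst hx
                exact hs'
              | cons b bs =>
                simp at hx
                subst hx
                exact hh b (by simp))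
          (by intro x hx
              have hgl : (buf ++ pend ++ [c]).getLast? = some c := by simp
              rw [hgl] at hx
              simp at hx
              subst hx
              exact hs')]
        congr 3
        simp

-- the tokenizer loop over all entries, closed form
theorem pvB_loop (entries : List String) (init : List String) :
    entries.foldl (fun toks e => pvScanGo e.toList toks [] []) init
      = init ++ entries.flatMap
          (fun e => (pvClean (e.toList.splitOnP (fun c => c == ','))).map String.ofList) := by
  induction entries generalizing init with
  | nil => simp
  | cons e es ih =>
    rw [List.foldl_cons, ih,
      pvScanGo_eq e.toList init [] [] (by simp) (by simp) (by simp) (fun _ => rfl)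
        (by simp) (by simp)]
    simp

-- the empty entry contributes nothing, so A's truthy filter is invisible in the closed form
theorem pvFilter_drop (entries : List String) :
    (entries.filter (fun e => !(e == ""))).flatMap
        (fun e => (pvClean (e.toList.splitOnP (fun c => c == ','))).map String.ofList)
      = entries.flatMap
          (fun e => (pvClean (e.toList.splitOnP (fun c => c == ','))).map String.ofList) := by
  induction entries with
  | nil => rfl
  | cons e es ih =>
    by_cases he : e = ""
    · subst he
      have h0 : pvClean [[]] = [] := rfl
      simp [h0, ih]
    · have h1 : (e == "") = false := by simp [he]
      simp [h1, ih]

-- ===== VERDICT (by name: the statement is the Claim_ definition above) =====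
theorem split_languages_py_spec : Claim_equal_split_languages_py := by
  intro raw _
  unfold Spec_split_languages_py split_languages_py split_languages_py_alt
  cases raw with
  | none => rfl
  | some entries =>
    by_cases he : entries.isEmpty
    · simp [he]
    · simp only [he, Bool.false_eq_true, if_false]
      rw [pvA_loop, pvB_loop, pvFilter_drop]
      simp
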